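-- pv_equiv track=rewrite | github.com/Ewelina179/Battleship | move_0.py | diagonal2
-- ===== SOURCE A (Python) =====
-- def diagonal2(col, row):
--     lst2=[]
--     lst2.append([a for a in range(col-1, -1, -1)])
--     lst2.append([b for b in range(row-1, -1, -1)])
--     lstt=[]
--     for i in zip(lst2[0],lst2[1]):
--         k=list(i)
--         lstt.append(k)
--     return lstt
-- ===== SOURCE B (Python) =====
-- def diagonal2(col, row):
--     n = min(max(col, 0), max(row, 0))
--     return [[col - 1 - i, row - 1 - i] for i in range(n)]
-- ===== Notes on version B (the rewrite author's own statement) =====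
-- stated objective: simpler
-- what changed: Replaces building two descending lists and zipping them with a closed-form pair count n = min(max(col,0),max(row,0)) and one arithmetic pass generating each pair directly.
import Mathlib
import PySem

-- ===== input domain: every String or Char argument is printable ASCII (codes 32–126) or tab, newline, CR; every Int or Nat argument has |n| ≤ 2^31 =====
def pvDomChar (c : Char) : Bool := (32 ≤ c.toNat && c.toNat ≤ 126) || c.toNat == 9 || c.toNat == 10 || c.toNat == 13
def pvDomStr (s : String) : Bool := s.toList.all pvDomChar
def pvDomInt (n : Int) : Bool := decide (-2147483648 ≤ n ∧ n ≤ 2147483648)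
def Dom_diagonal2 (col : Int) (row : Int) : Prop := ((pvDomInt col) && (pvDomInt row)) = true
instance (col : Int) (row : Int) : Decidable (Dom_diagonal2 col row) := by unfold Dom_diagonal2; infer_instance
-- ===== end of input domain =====

-- B replaces the two descending lists + zip with a closed-form count and one arithmetic pass (objective: simpler).
-- ===== PORT A =====
def diagonal2 (col : Int) (row : Int) : List (List Int) :=
  let lst2 : List (List Int) :=
    [] ++ [PySem.List.pyRange (col - 1) (-1) (-1)] ++ [PySem.List.pyRange (row - 1) (-1) (-1)]
  let lstt : List (List Int) :=
    (List.zip (lst2.getD 0 []) (lst2.getD 1 [])).foldl (fun acc i => acc ++ [[i.1, i.2]]) []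
  lstt

-- ===== PORT B =====
def diagonal2_alt (col : Int) (row : Int) : List (List Int) :=
  let n : Int := min (max col 0) (max row 0)
  (PySem.List.pyRange 0 n 1).map (fun i => [col - 1 - i, row - 1 - i])

-- ===== PRECONDITION & SPEC =====
def Spec_diagonal2 (col : Int) (row : Int) (out : List (List Int)) : Prop := out = diagonal2_alt col row
instance (col : Int) (row : Int) (out : List (List Int)) : Decidable (Spec_diagonal2 col row out) := by unfold Spec_diagonal2; infer_instance

-- ===== CLAIM (what is proved, stated in full; the proofs are below) =====
def Claim_equal_diagonal2 : Prop := ∀ (col : Int) (row : Int), Dom_diagonal2 col row → Spec_diagonal2 col row (diagonal2 col row)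

-- ===== LEMMAS AND PROOFS =====

-- ===== VERDICT (by name: the statement is the Claim_ definition above) =====
lemma foldl_snoc_map (l : List (Int × Int)) (acc : List (List Int)) :
    l.foldl (fun acc i => acc ++ [[i.1, i.2]]) acc = acc ++ l.map (fun i => [i.1, i.2]) := by
  induction l generalizing acc with
  | nil => simp [List.foldl]
  | cons x xs ih => simp [List.foldl, ih]

lemma zip_map_range (f g : Nat → Int) (a b : Nat) :
    List.zip ((List.range a).map f) ((List.range b).map g)
      = (List.range (min a b)).map (fun k => (f k, g k)) := by
  apply List.ext_getElem
  · simp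
  · intro i h1 h2
    simp [List.getElem_zip]

theorem diagonal2_spec : Claim_equal_diagonal2 := by
  intro col row _
  unfold Spec_diagonal2 diagonal2 diagonal2_alt
  simp only [PySem.List.pyRange_neg_one, PySem.List.pyRange_one, List.nil_append,
    List.cons_append, List.getD, List.getElem?_cons_zero, List.getElem?_cons_succ,
    Option.getD_some]
  rw [zip_map_range, foldl_snoc_map]
  have hn : min col.toNat row.toNat = (min (max col 0) (max row 0)).toNat := by omega
  simp [List.map_map, Function.comp_def, hn]
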